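-- pv_equiv track=rewrite | github.com/PushpitKumar/Python-Scripts | while-loop2.py | beginning1
-- ===== SOURCE A (Python) =====
-- def beginning1(lst):
--     i = 0
--     new_list = []
--     while i < len(lst):
--         if lst[i] == 'bye':
--             break
--         new_list.append(lst[i])
--         i+=1
--     return new_list[:10] #Using slicing method
-- ===== SOURCE B (Python) =====
-- def beginning1(lst):
--     def go(seq, k):
--         if k == 0 or not seq or seq[0] == 'bye':
--             return []
--         return [seq[0]] + go(seq[1:], k - 1)
--     return go(list(lst), 10)
-- ===== Notes on version B (the rewrite author's own statement) =====
-- stated objective: alternative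
-- what changed: Replaces the index-driven while loop that appends everything before 'bye' and then slices off the first 10 with a bounded recursive builder that threads the remaining count and stops as soon as 10 elements are taken, 'bye' is seen, or the list ends.
import Mathlib
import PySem

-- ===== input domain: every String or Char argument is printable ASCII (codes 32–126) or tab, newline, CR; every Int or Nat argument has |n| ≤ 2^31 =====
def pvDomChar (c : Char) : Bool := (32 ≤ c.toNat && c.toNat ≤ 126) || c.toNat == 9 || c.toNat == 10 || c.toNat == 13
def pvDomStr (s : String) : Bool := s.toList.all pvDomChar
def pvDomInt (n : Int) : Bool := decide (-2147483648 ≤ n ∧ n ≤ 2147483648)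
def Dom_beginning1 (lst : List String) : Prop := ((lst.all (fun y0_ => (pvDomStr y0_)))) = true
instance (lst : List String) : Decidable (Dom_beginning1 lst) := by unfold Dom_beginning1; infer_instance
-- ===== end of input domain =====

-- B replaces the index-while-append-then-slice with a count-bounded recursive builder
-- that stops at 10 taken elements, at 'bye', or at the end of the list (alternative decomposition).

-- ===== PORT A =====
-- while i < len(lst): if lst[i]=='bye': break; new_list.append(lst[i]); i+=1
def beginning1Go (lst : List String) (i : Nat) (acc : List String) : List String :=
  if h : i < lst.length then
    if lst[i] = "bye" then acc
    else beginning1Go lst (i + 1) (acc ++ [lst[i]])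
  else acc
termination_by lst.length - i

-- return new_list[:10]
def beginning1 (lst : List String) : List String :=
  PySem.List.slice (beginning1Go lst 0 []) none (some 10)

-- ===== PORT B =====
-- def go(seq, k): if k == 0 or not seq or seq[0] == 'bye': return []; return [seq[0]] + go(seq[1:], k-1)
def beginning1AltGo (seq : List String) (k : Nat) : List String :=
  if k = 0 then []
  else
    match seq with
    | [] => []
    | x :: xs => if x = "bye" then [] else x :: beginning1AltGo xs (k - 1)

def beginning1_alt (lst : List String) : List String :=
  beginning1AltGo lst 10

-- ===== PRECONDITION & SPEC =====
def Spec_beginning1 (lst : List String) (out : List String) : Prop := out = beginning1_alt lst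
instance (lst : List String) (out : List String) : Decidable (Spec_beginning1 lst out) := by unfold Spec_beginning1; infer_instance

-- ===== CLAIM (what is proved, stated in full; the proofs are below) =====
def Claim_equal_beginning1 : Prop := ∀ (lst : List String), Dom_beginning1 lst → Spec_beginning1 lst (beginning1 lst)

-- ===== LEMMAS AND PROOFS =====
lemma beginning1Go_eq (lst : List String) (i : Nat) (acc : List String) :
    beginning1Go lst i acc = acc ++ (lst.drop i).takeWhile (fun x => x != "bye") := by
  induction hn : lst.length - i generalizing i acc with
  | zero =>
    rw [beginning1Go]
    have h1 : ¬ i < lst.length := by omega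
    have h2 : lst.drop i = [] := List.drop_eq_nil_of_le (by omega)
    simp [h1, h2]
  | succ n ih =>
    rw [beginning1Go]
    have hi : i < lst.length := by omega
    have hdrop : lst.drop i = lst[i] :: lst.drop (i + 1) := List.drop_eq_getElem_cons hi
    by_cases hb : lst[i] = "bye"
    · rw [hdrop, List.takeWhile_cons_of_neg (by simp [hb])] at *
      simp [hi, hb]
    · simp only [hi, dif_pos, hb, ih (i + 1) _ (by omega)]
      rw [hdrop, List.takeWhile_cons_of_pos (by simp [hb])]
      simp

lemma beginning1AltGo_eq (seq : List String) (k : Nat) :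
    beginning1AltGo seq k = (seq.takeWhile (fun x => x != "bye")).take k := by
  induction seq generalizing k with
  | nil => rw [beginning1AltGo]; split <;> simp
  | cons x xs ih =>
    rw [beginning1AltGo]
    by_cases hk : k = 0
    · simp [hk]
    · by_cases hb : x = "bye"
      · simp [hk, hb]
      · obtain ⟨m, rfl⟩ : ∃ m, k = m + 1 := ⟨k - 1, by omega⟩
        simp [hb, ih]

-- ===== VERDICT (by name: the statement is the Claim_ definition above) =====
theorem beginning1_spec : Claim_equal_beginning1 := by
  intro lst _
  unfold Spec_beginning1 beginning1 beginning1_alt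
  rw [beginning1Go_eq, beginning1AltGo_eq]
  have : (10 : Int) = ((10 : Nat) : Int) := by norm_num
  rw [this, PySem.List.slice_to_natCast]
  simp
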